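-- pv_equiv track=rewrite | github.com/SillySerpent/Repograph | repograph/plugins/exporters/doc_warnings/plugin.py | _examples_only_skip_line_numbers
-- ===== SOURCE A (Python) =====
-- _EXAMPLES_ONLY_MARK = "<!-- repograph: examples-only -->"
--
-- def _examples_only_skip_line_numbers(content):
--     skip = set()
--     lines = content.splitlines(keepends=True)
--     i = 0
--     while i < len(lines):
--         if _EXAMPLES_ONLY_MARK not in lines[i]:
--             i += 1; continue
--         i += 1
--         while i < len(lines) and not lines[i].strip(): i += 1
--         if i >= len(lines): break
--         if lines[i].lstrip().startswith("```"):
--             skip.add(i + 1); i += 1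
--             while i < len(lines) and not lines[i].strip().startswith("```"):
--                 skip.add(i + 1); i += 1
--             if i < len(lines): skip.add(i + 1); i += 1
--         else:
--             while i < len(lines) and lines[i].strip():
--                 skip.add(i + 1); i += 1
--     return skip
-- ===== SOURCE B (Python) =====
-- _EXAMPLES_ONLY_MARK = "<!-- repograph: examples-only -->"
--
-- def _examples_only_skip_line_numbers(content):
--     # Flat single-pass state machine over enumerate(lines):
--     # 0 = SEEKING the mark, 1 = skipping blanks after the mark,
--     # 2 = inside a ``` fence, 3 = inside a plain text block.
--     SEEK, BLANKS, FENCE, TEXT = 0, 1, 2, 3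
--     state = SEEK
--     skip = set()
--     for i, line in enumerate(content.splitlines(keepends=True)):
--         if state == TEXT:
--             if line.strip():
--                 skip.add(i + 1)
--                 continue
--             state = SEEK  # text block ended: re-examine this line for the mark
--         if state == SEEK:
--             if _EXAMPLES_ONLY_MARK in line:
--                 state = BLANKS
--             continue
--         if state == BLANKS:
--             if not line.strip():
--                 continue
--             skip.add(i + 1)
--             state = FENCE if line.lstrip().startswith("```") else TEXT
--             continue
--         # state == FENCE
--         skip.add(i + 1)
--         if line.strip().startswith("```"):
--             state = SEEK
--     return skip
-- ===== Notes on version B (the rewrite author's own statement) =====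
-- stated objective: alternative
-- what changed: A's outer while-loop with three nested inner while-loops and manual index bookkeeping is replaced by one flat single-pass state machine (SEEK/BLANKS/FENCE/TEXT) folded over enumerate(lines).
import Mathlib
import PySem

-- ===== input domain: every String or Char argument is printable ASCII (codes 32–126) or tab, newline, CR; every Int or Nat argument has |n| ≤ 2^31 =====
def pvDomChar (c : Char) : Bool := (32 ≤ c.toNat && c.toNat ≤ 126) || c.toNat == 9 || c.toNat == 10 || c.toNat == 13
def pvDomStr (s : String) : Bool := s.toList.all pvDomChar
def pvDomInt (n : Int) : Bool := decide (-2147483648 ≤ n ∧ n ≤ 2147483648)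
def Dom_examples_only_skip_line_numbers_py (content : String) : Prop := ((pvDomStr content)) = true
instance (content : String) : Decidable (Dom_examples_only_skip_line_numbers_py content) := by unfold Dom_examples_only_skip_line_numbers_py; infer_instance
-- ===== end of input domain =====

-- B replaces A's nested while-loops (index bookkeeping across four loops) by one flat
-- single-pass state machine over enumerate(lines); objective: alternative decomposition, same cost.

-- Shared helper: exact port of str.splitlines(keepends=True) for line breaks '\n', '\r', '\r\n'
-- (the only line-break characters admitted by Dom_; both Pythons make this same stdlib call).
def pvSplitlinesKeepAux : List Char → List Char → List (List Char)
  | cur, [] => if cur.isEmpty then [] else [cur.reverse]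
  | cur, '\r' :: '\n' :: rest => ('\n' :: '\r' :: cur).reverse :: pvSplitlinesKeepAux [] rest
  | cur, '\r' :: rest => ('\r' :: cur).reverse :: pvSplitlinesKeepAux [] rest
  | cur, '\n' :: rest => ('\n' :: cur).reverse :: pvSplitlinesKeepAux [] rest
  | cur, c :: rest => pvSplitlinesKeepAux (c :: cur) rest

def pvLines (content : String) : List String :=
  (pvSplitlinesKeepAux [] content.toList).map String.ofList

def pvMark : String := "<!-- repograph: examples-only -->"

-- ===== PORT A =====
-- A's outer while loop and its three inner while loops, one function each, index i as in A.
mutual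
def pvAOuter (L : List String) (i : Nat) (skip : PySem.Set Int) : PySem.Set Int :=
  if h : i < L.length then
    if ¬ (PySem.Str.isIn pvMark L[i] = true) then pvAOuter L (i + 1) skip
    else pvABlanks L (i + 1) skip
  else skip
  termination_by (L.length - i) * 3
def pvABlanks (L : List String) (i : Nat) (skip : PySem.Set Int) : PySem.Set Int :=
  if h : i < L.length then
    if PySem.Str.strip L[i] = "" then pvABlanks L (i + 1) skip
    else if PySem.Str.startswith (PySem.Str.lstrip L[i]) "```" then
      pvAFence L (i + 1) (PySem.Set.add skip ((i : Int) + 1))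
    else pvAText L i skip
  else skip
  termination_by (L.length - i) * 3 + 2
def pvAFence (L : List String) (i : Nat) (skip : PySem.Set Int) : PySem.Set Int :=
  if h : i < L.length then
    if ¬ (PySem.Str.startswith (PySem.Str.strip L[i]) "```" = true) then
      pvAFence L (i + 1) (PySem.Set.add skip ((i : Int) + 1))
    else pvAOuter L (i + 1) (PySem.Set.add skip ((i : Int) + 1))
  else skip
  termination_by (L.length - i) * 3
def pvAText (L : List String) (i : Nat) (skip : PySem.Set Int) : PySem.Set Int :=
  if h : i < L.length then
    if ¬ (PySem.Str.strip L[i] = "") then pvAText L (i + 1) (PySem.Set.add skip ((i : Int) + 1))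
    else pvAOuter L i skip
  else pvAOuter L i skip
  termination_by (L.length - i) * 3 + 1
end

def examples_only_skip_line_numbers_py (content : String) : List Int :=
  pvAOuter (pvLines content) 0 PySem.Set.empty

-- ===== PORT B =====
-- one step of Source B's for-loop body: state 0 = SEEK, 1 = BLANKS, 2 = FENCE, 3 = TEXT;
-- the TEXT-ended fallthrough re-runs the SEEK check on the same line, as in Source B.
def pvBStep (acc : Nat × PySem.Set Int) (p : Int × String) : Nat × PySem.Set Int :=
  let st := acc.1; let skip := acc.2; let i := p.1; let line := p.2
  if st = 3 then
    if ¬ (PySem.Str.strip line = "") then (3, PySem.Set.add skip (i + 1))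
    else if PySem.Str.isIn pvMark line then (1, skip) else (0, skip)
  else if st = 0 then
    if PySem.Str.isIn pvMark line then (1, skip) else (0, skip)
  else if st = 1 then
    if PySem.Str.strip line = "" then (1, skip)
    else if PySem.Str.startswith (PySem.Str.lstrip line) "```" then (2, PySem.Set.add skip (i + 1))
    else (3, PySem.Set.add skip (i + 1))
  else
    if PySem.Str.startswith (PySem.Str.strip line) "```" then (0, PySem.Set.add skip (i + 1))
    else (2, PySem.Set.add skip (i + 1))

def examples_only_skip_line_numbers_py_alt (content : String) : List Int :=
  ((PySem.List.enumerate (pvLines content)).foldl pvBStep (0, PySem.Set.empty)).2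

-- ===== PRECONDITION & SPEC =====
def Spec_examples_only_skip_line_numbers_py (content : String) (out : List Int) : Prop := out = examples_only_skip_line_numbers_py_alt content
instance (content : String) (out : List Int) : Decidable (Spec_examples_only_skip_line_numbers_py content out) := by unfold Spec_examples_only_skip_line_numbers_py; infer_instance

-- ===== CLAIM (what is proved, stated in full; the proofs are below) =====
def Claim_equal_examples_only_skip_line_numbers_py : Prop := ∀ (content : String), Dom_examples_only_skip_line_numbers_py content → Spec_examples_only_skip_line_numbers_py content (examples_only_skip_line_numbers_py content)

-- ===== LEMMAS AND PROOFS =====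
-- One step of B's fold, unfolded at each of the four states (definitional).
lemma pvBStep_seek (skip : PySem.Set Int) (i : Int) (line : String) :
    pvBStep (0, skip) (i, line)
    = if PySem.Str.isIn pvMark line then (1, skip) else (0, skip) := by simp only [pvBStep]; rfl
lemma pvBStep_blanks (skip : PySem.Set Int) (i : Int) (line : String) :
    pvBStep (1, skip) (i, line)
    = if PySem.Str.strip line = "" then (1, skip)
      else if PySem.Str.startswith (PySem.Str.lstrip line) "```" then (2, PySem.Set.add skip (i + 1))
      else (3, PySem.Set.add skip (i + 1)) := by simp only [pvBStep]; rfl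
lemma pvBStep_fence (skip : PySem.Set Int) (i : Int) (line : String) :
    pvBStep (2, skip) (i, line)
    = if PySem.Str.startswith (PySem.Str.strip line) "```" then (0, PySem.Set.add skip (i + 1))
      else (2, PySem.Set.add skip (i + 1)) := by simp only [pvBStep]; rfl
lemma pvBStep_text (skip : PySem.Set Int) (i : Int) (line : String) :
    pvBStep (3, skip) (i, line)
    = if ¬ (PySem.Str.strip line = "") then (3, PySem.Set.add skip (i + 1))
      else if PySem.Str.isIn pvMark line then (1, skip) else (0, skip) := by simp only [pvBStep]; rfl

-- Out of input: all four of A's loops return skip, and B's foldl has nothing left to eat.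
lemma pvBase (L : List String) (i : Nat) (skip : PySem.Set Int) (h : L.length ≤ i) :
    pvAOuter L i skip = (((PySem.List.enumerate L).drop i).foldl pvBStep (0, skip)).2
    ∧ pvABlanks L i skip = (((PySem.List.enumerate L).drop i).foldl pvBStep (1, skip)).2
    ∧ pvAFence L i skip = (((PySem.List.enumerate L).drop i).foldl pvBStep (2, skip)).2
    ∧ pvAText L i skip = (((PySem.List.enumerate L).drop i).foldl pvBStep (3, skip)).2 := by
  have hd : ((PySem.List.enumerate L).drop i) = ([] : List (Int × String)) := by
    apply List.drop_eq_nil_of_le; simp [PySem.List.length_enumerate]; omega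
  have ho : pvAOuter L i skip = skip := by rw [pvAOuter]; simp [Nat.not_lt.mpr h]
  refine ⟨?_, ?_, ?_, ?_⟩ <;> rw [hd]
  · simpa using ho
  · rw [pvABlanks]; simp [Nat.not_lt.mpr h]
  · rw [pvAFence]; simp [Nat.not_lt.mpr h]
  · rw [pvAText]; simp [Nat.not_lt.mpr h, ho]

-- The core invariant: starting at line i with accumulated set `skip`, each of A's loops
-- computes exactly what B's foldl computes from the corresponding state over the remaining lines.
lemma pvMain (L : List String) (n : Nat) : ∀ i skip, L.length - i ≤ n →
    pvAOuter L i skip = (((PySem.List.enumerate L).drop i).foldl pvBStep (0, skip)).2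
    ∧ pvABlanks L i skip = (((PySem.List.enumerate L).drop i).foldl pvBStep (1, skip)).2
    ∧ pvAFence L i skip = (((PySem.List.enumerate L).drop i).foldl pvBStep (2, skip)).2
    ∧ pvAText L i skip = (((PySem.List.enumerate L).drop i).foldl pvBStep (3, skip)).2 := by
  induction n with
  | zero => intro i skip h; exact pvBase L i skip (by omega)
  | succ n ih =>
    intro i skip h
    by_cases hi : i < L.length
    · have hd : ((PySem.List.enumerate L).drop i)
          = ((i : Int), L[i]) :: ((PySem.List.enumerate L).drop (i + 1)) := by
        have : i < (PySem.List.enumerate L).length := by simpa [PySem.List.length_enumerate] using hi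
        rw [List.drop_eq_getElem_cons this, PySem.List.getElem_enumerate]
        simp
      have ih' := ih (i + 1) ; have hn : L.length - (i + 1) ≤ n := by omega
      rw [hd]
      refine ⟨?_, ?_, ?_, ?_⟩ <;> rw [List.foldl_cons]
      · rw [pvAOuter, dif_pos hi, pvBStep_seek]
        by_cases hm : PySem.Str.isIn pvMark L[i] = true
        · rw [if_neg (not_not_intro hm), if_pos hm]; exact (ih' skip hn).2.1
        · rw [if_pos hm, if_neg hm]; exact (ih' skip hn).1
      · rw [pvABlanks, dif_pos hi, pvBStep_blanks]
        by_cases hb : PySem.Str.strip L[i] = ""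
        · rw [if_pos hb, if_pos hb]; exact (ih' skip hn).2.1
        · rw [if_neg hb, if_neg hb]
          by_cases hf : PySem.Str.startswith (PySem.Str.lstrip L[i]) "```" = true
          · rw [if_pos hf, if_pos hf]; exact (ih' _ hn).2.2.1
          · rw [if_neg hf, if_neg hf, pvAText, dif_pos hi, if_pos hb]
            exact (ih' _ hn).2.2.2
      · rw [pvAFence, dif_pos hi, pvBStep_fence]
        by_cases hc : PySem.Str.startswith (PySem.Str.strip L[i]) "```" = true
        · rw [if_neg (not_not_intro hc), if_pos hc]; exact (ih' _ hn).1
        · rw [if_pos hc, if_neg hc]; exact (ih' _ hn).2.2.1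
      · rw [pvAText, dif_pos hi, pvBStep_text]
        by_cases hb : PySem.Str.strip L[i] = ""
        · rw [if_neg (not_not_intro hb), if_neg (not_not_intro hb), pvAOuter, dif_pos hi]
          by_cases hm : PySem.Str.isIn pvMark L[i] = true
          · rw [if_neg (not_not_intro hm), if_pos hm]; exact (ih' skip hn).2.1
          · rw [if_pos hm, if_neg hm]; exact (ih' skip hn).1
        · rw [if_pos hb, if_pos hb]; exact (ih' _ hn).2.2.2
    · exact pvBase L i skip (by omega)
-- ===== VERDICT (by name: the statement is the Claim_ definition above) =====
theorem examples_only_skip_line_numbers_py_spec : Claim_equal_examples_only_skip_line_numbers_py := by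
  intro content _
  unfold Spec_examples_only_skip_line_numbers_py
  unfold examples_only_skip_line_numbers_py examples_only_skip_line_numbers_py_alt
  have := (pvMain (pvLines content) (pvLines content).length 0 PySem.Set.empty (by omega)).1
  simpa using this
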